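-- pv_equiv track=rewrite | github.com/Khim3/DSA_Project | Non-OOP version/merge_sort.py | colorArray
-- ===== SOURCE A (Python) =====
-- def colorArray(length, left, middle, right):
--     colorArray = []
--     for i in range(length):
--         if i >= left and i <= right:
--             if i>= left and i <= right:
--                 colorArray.append('yellow')
--
--             else:
--                 colorArray.append('orange')
--         else:
--             colorArray.append('blue')
--     return colorArray
-- ===== SOURCE B (Python) =====
-- def colorArray(length, left, middle, right):
--     n = max(length, 0)
--     lo = min(max(left, 0), n)
--     hi = max(min(right + 1, n), lo)
--     return ['blue'] * lo + ['yellow'] * (hi - lo) + ['blue'] * (n - hi)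
-- ===== Notes on version B (the rewrite author's own statement) =====
-- stated objective: simpler
-- what changed: Replaces A's per-element loop with an if/else (and a redundant duplicated test) by a loop-free closed form: three list-repetition segments blue-prefix ++ yellow-segment ++ blue-suffix whose lengths are computed by clamping left/right.
import Mathlib
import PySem

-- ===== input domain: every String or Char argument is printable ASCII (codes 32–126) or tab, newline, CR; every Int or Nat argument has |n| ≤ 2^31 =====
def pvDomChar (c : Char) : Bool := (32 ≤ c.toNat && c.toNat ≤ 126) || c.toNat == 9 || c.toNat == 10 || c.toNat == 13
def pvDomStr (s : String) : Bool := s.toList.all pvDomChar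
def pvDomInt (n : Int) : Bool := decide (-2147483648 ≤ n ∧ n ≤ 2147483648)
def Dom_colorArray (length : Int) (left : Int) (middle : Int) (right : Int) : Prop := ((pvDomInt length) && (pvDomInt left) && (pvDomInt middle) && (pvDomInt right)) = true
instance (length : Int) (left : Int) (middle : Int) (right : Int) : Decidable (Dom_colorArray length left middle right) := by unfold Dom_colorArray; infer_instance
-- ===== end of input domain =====

-- B replaces A's per-element branch loop by a loop-free three-segment closed form
-- (blue-prefix ++ yellow-segment ++ blue-suffix with clamped lengths): simpler, same cost.


-- ===== PORT A =====
def colorArray (length : Int) (left : Int) (middle : Int) (right : Int) : List String :=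
  (PySem.List.pyRange 0 length 1).foldl (fun acc i =>
    if i ≥ left ∧ i ≤ right then
      if i ≥ left ∧ i ≤ right then acc ++ ["yellow"]
      else acc ++ ["orange"]
    else acc ++ ["blue"]) []

-- ===== PORT B =====
def colorArray_alt (length : Int) (left : Int) (middle : Int) (right : Int) : List String :=
  let n := max length 0
  let lo := min (max left 0) n
  let hi := max (min (right + 1) n) lo
  List.replicate lo.toNat "blue" ++ List.replicate (hi - lo).toNat "yellow"
    ++ List.replicate (n - hi).toNat "blue"

-- ===== PRECONDITION & SPEC =====
def Spec_colorArray (length : Int) (left : Int) (middle : Int) (right : Int) (out : List String) : Prop := out = colorArray_alt length left middle right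
instance (length : Int) (left : Int) (middle : Int) (right : Int) (out : List String) : Decidable (Spec_colorArray length left middle right out) := by unfold Spec_colorArray; infer_instance

-- ===== CLAIM (what is proved, stated in full; the proofs are below) =====
def Claim_equal_colorArray : Prop := ∀ (length : Int) (left : Int) (middle : Int) (right : Int), Dom_colorArray length left middle right → Spec_colorArray length left middle right (colorArray length left middle right)

-- ===== LEMMAS AND PROOFS =====

-- A's fold in map form
theorem colorArray_eq_map (length left middle right : Int) :
    colorArray length left middle right =
      (List.range length.toNat).map
        (fun k : Nat => if left ≤ (k : Int) ∧ (k : Int) ≤ right then "yellow" else "blue") := by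
  unfold colorArray
  rw [PySem.List.pyRange_one]
  rw [show (fun acc (i : Int) =>
      if i ≥ left ∧ i ≤ right then
        if i ≥ left ∧ i ≤ right then acc ++ ["yellow"] else acc ++ ["orange"]
      else acc ++ ["blue"]) =
      (fun (acc : List String) (i : Int) =>
        acc ++ [if left ≤ i ∧ i ≤ right then "yellow" else "blue"]) from by
    funext acc i; by_cases h : left ≤ i ∧ i ≤ right <;> simp [h]]
  rw [List.foldl_map, PySem.List.foldl_append_singleton_eq_map]
  simp

theorem map_range_three (n a b c : Nat) (f : Nat → String) (h : a + b + c = n)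
    (hb1 : ∀ k, k < a → f k = "blue")
    (hy : ∀ k, a ≤ k → k < a + b → f k = "yellow")
    (hb2 : ∀ k, a + b ≤ k → k < n → f k = "blue") :
    (List.range n).map f =
      List.replicate a "blue" ++ List.replicate b "yellow" ++ List.replicate c "blue" := by
  apply List.ext_getElem?
  intro k
  simp only [List.getElem?_map, List.getElem?_append,
    List.getElem?_replicate, List.length_replicate, List.length_append]
  by_cases hka : k < a
  · simp [hka, show k < n by omega, hb1 k hka] <;> omega
  · by_cases hkb : k - a < b
    · simp [hka, hkb, show k < n by omega, hy k (by omega) (by omega)] <;> omega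
    · by_cases hkc : k - a - b < c
      · simp [hka, hkb, show k < n by omega, hb2 k (by omega) (by omega)] <;> omega
      · simp [hka, hkb, show ¬ k < n by omega] <;> omega

theorem colorArray_agree (length left middle right : Int) :
    colorArray length left middle right = colorArray_alt length left middle right := by
  rw [colorArray_eq_map]
  unfold colorArray_alt
  exact map_range_three length.toNat (min (max left 0) (max length 0)).toNat
    (max (min (right + 1) (max length 0)) (min (max left 0) (max length 0))
      - min (max left 0) (max length 0)).toNat
    (max length 0 - max (min (right + 1) (max length 0)) (min (max left 0) (max length 0))).toNat
    _ (by omega)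
    (fun k hk => by
      have : ¬ (left ≤ (k : Int) ∧ (k : Int) ≤ right) := by omega
      simp [this])
    (fun k h1 h2 => by
      have : left ≤ (k : Int) ∧ (k : Int) ≤ right := by omega
      simp [this])
    (fun k h1 h2 => by
      have : ¬ (left ≤ (k : Int) ∧ (k : Int) ≤ right) := by omega
      simp [this])

-- ===== VERDICT (by name: the statement is the Claim_ definition above) =====
theorem colorArray_spec : Claim_equal_colorArray := by
  intro length left middle right _
  unfold Spec_colorArray
  exact colorArray_agree length left middle right
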